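-- pv_equiv track=rewrite | github.com/eddmpython/dartlab | experiments/063_tableMapper/009_structureType.py | splitSubtables
-- ===== SOURCE A (Python) =====
-- def splitSubtables(md: str) -> list[list[str]]:
--     tables, current = [], []
--     for line in md.strip().split("\n"):
--         s = line.strip()
--         if not s.startswith("|"):
--             if current:
--                 tables.append(current)
--                 current = []
--             continue
--         cells = [c.strip() for c in s.strip("|").split("|")]
--         isSep = all(set(c.strip()) <= {"-", ":"} for c in cells if c.strip())
--         if isSep and current:
--             if len(current) >= 2:
--                 prev = current[:-1]
--                 if prev:
--                     tables.append(prev)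
--                 current = [current[-1], s]
--             else:
--                 current.append(s)
--         else:
--             current.append(s)
--     if current:
--         tables.append(current)
--     return tables
-- ===== SOURCE B (Python) =====
-- def _isSep(s: str) -> bool:
--     cells = [c.strip() for c in s.strip("|").split("|")]
--     return all(set(c.strip()) <= {"-", ":"} for c in cells if c.strip())
--
--
-- def splitSubtables(md: str) -> list[list[str]]:
--     lines = [ln.strip() for ln in md.strip().split("\n")]
--     out = []
--     rest = lines
--     while rest:
--         if not rest[0].startswith("|"):
--             rest = rest[1:]
--             continue
--         k = 1
--         while k < len(rest) and rest[k].startswith("|"):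
--             k += 1
--         block, rest = rest[:k], rest[k:]
--         start = 0
--         for idx in range(len(block)):
--             if _isSep(block[idx]) and idx - start >= 2:
--                 out.append(block[start:idx - 1])
--                 start = idx - 1
--         out.append(block[start:])
--     return out
-- ===== Notes on version B (the rewrite author's own statement) =====
-- stated objective: alternative
-- what changed: A is a single fused state machine mutating a running accumulator list; B is a two-phase decomposition: first group the stripped lines into maximal pipe-prefixed blocks, then cut each block into subtables by index slicing at separator-row boundaries.
import Mathlib
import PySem

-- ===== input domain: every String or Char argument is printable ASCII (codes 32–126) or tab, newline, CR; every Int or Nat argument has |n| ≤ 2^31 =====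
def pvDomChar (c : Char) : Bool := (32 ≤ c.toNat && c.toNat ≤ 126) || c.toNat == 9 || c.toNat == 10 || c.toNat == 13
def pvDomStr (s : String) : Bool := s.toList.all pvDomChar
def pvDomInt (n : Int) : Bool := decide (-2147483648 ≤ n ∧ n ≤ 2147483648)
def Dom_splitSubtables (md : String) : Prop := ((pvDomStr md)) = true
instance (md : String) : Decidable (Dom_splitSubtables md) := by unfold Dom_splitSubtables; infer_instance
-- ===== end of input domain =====

-- B restructures A's single fused state machine into two phases: group the stripped lines into
-- maximal pipe-prefixed blocks, then cut each block at separator rows by index slicing (objective: alternative decomposition).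

-- ===== PORT A =====
-- s.split(sep) for the literal nonempty seps "\n" / "|" (split? is some for nonempty sep)
def pvSplit (s : String) (sep : String) : List String := (PySem.Str.split? s sep).getD []

-- the body of A's for-loop: state = (tables, current)
def stepA (st : List (List String) × List String) (line : String) : List (List String) × List String :=
  let s := PySem.Str.strip line
  if ¬ (PySem.Str.startswith s "|" = true) then
    if st.2 ≠ [] then (st.1 ++ [st.2], []) else st
  else
    let cells := (pvSplit (PySem.Str.stripChars s "|") "|").map PySem.Str.strip
    let isSep := cells.all (fun c =>
      (PySem.Str.strip c == "") || (PySem.Str.strip c).toList.all (fun ch => ch == '-' || ch == ':'))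
    if isSep = true ∧ st.2 ≠ [] then
      if st.2.length ≥ 2 then
        let prev := PySem.List.slice st.2 none (some (-1))        -- current[:-1]
        let last := PySem.List.pyGetD st.2 (-1) ""                -- current[-1] (guarded by len ≥ 2)
        (if prev ≠ [] then st.1 ++ [prev] else st.1, [last, s])
      else (st.1, st.2 ++ [s])
    else (st.1, st.2 ++ [s])

def splitSubtables (md : String) : List (List String) :=
  let st := (pvSplit (PySem.Str.strip md) "\n").foldl stepA ([], [])
  if st.2 ≠ [] then st.1 ++ [st.2] else st.1

-- ===== PORT B =====
-- _isSep of Source B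
def altIsSep (s : String) : Bool :=
  ((pvSplit (PySem.Str.stripChars s "|") "|").map PySem.Str.strip).all (fun c =>
    (PySem.Str.strip c == "") || (PySem.Str.strip c).toList.all (fun ch => ch == '-' || ch == ':'))

-- body of Source B's 'for idx in range(len(block))' loop: state = (out, start)
def segStep (block : List String) (st : List (List String) × Nat) (idx : Nat) :
    List (List String) × Nat :=
  if altIsSep (block.getD idx "") = true ∧ idx - st.2 ≥ 2 then
    (st.1 ++ [(block.drop st.2).take (idx - 1 - st.2)], idx - 1)  -- block[start:idx-1]
  else st

-- segmentation of one block by slicing at separator boundaries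
def altSeg (block : List String) : List (List String) :=
  let st := (List.range block.length).foldl (segStep block) ([], 0)
  st.1 ++ [block.drop st.2]

-- Source B's outer while loop over 'rest': peel one maximal '|'-block (rest[:k]/rest[k:]) or one non-table line
def altGo : List String → List (List String)
  | [] => []
  | l :: ls =>
    if PySem.Str.startswith l "|" = true then
      altSeg (l :: ls.takeWhile (fun x => PySem.Str.startswith x "|"))
        ++ altGo (ls.dropWhile (fun x => PySem.Str.startswith x "|"))
    else altGo ls
termination_by L => L.length
decreasing_by
  · have := List.length_dropWhile_le (fun x => PySem.Str.startswith x "|") ls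
    simp only [List.length_cons]; omega
  · simp only [List.length_cons]; omega

def splitSubtables_alt (md : String) : List (List String) :=
  altGo ((pvSplit (PySem.Str.strip md) "\n").map PySem.Str.strip)

-- ===== PRECONDITION & SPEC =====
def Spec_splitSubtables (md : String) (out : List (List String)) : Prop := out = splitSubtables_alt md
instance (md : String) (out : List (List String)) : Decidable (Spec_splitSubtables md out) := by unfold Spec_splitSubtables; infer_instance

-- ===== CLAIM (what is proved, stated in full; the proofs are below) =====
def Claim_equal_splitSubtables : Prop := ∀ (md : String), Dom_splitSubtables md → Spec_splitSubtables md (splitSubtables md)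

-- ===== LEMMAS AND PROOFS =====

-- A's step on an already-stripped line
def stepT (st : List (List String) × List String) (s : String) : List (List String) × List String :=
  if ¬ (PySem.Str.startswith s "|" = true) then
    if st.2 ≠ [] then (st.1 ++ [st.2], []) else st
  else
    if altIsSep s = true ∧ st.2 ≠ [] then
      if st.2.length ≥ 2 then
        let prev := PySem.List.slice st.2 none (some (-1))
        let last := PySem.List.pyGetD st.2 (-1) ""
        (if prev ≠ [] then st.1 ++ [prev] else st.1, [last, s])
      else (st.1, st.2 ++ [s])
    else (st.1, st.2 ++ [s])

lemma stepA_eq_stepT : (fun st line => stepT st (PySem.Str.strip line)) = stepA := rfl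

-- A's flush at end of input
def finT (st : List (List String) × List String) : List (List String) :=
  if st.2 ≠ [] then st.1 ++ [st.2] else st.1

-- specification recursion for A's behaviour inside one '|'-block:
-- returns (emitted subtables, final current)
def gA (cur : List String) : List String → List (List String) × List String
  | [] => ([], cur)
  | s :: ls =>
    if altIsSep s = true ∧ cur ≠ [] then
      if cur.length ≥ 2 then
        let prev := PySem.List.slice cur none (some (-1))
        let last := PySem.List.pyGetD cur (-1) ""
        let r := gA [last, s] ls
        (if prev ≠ [] then prev :: r.1 else r.1, r.2)
      else gA (cur ++ [s]) ls
    else gA (cur ++ [s]) ls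

lemma gA_nil (cur : List String) : gA cur [] = ([], cur) := rfl

lemma gA_cons (cur : List String) (s : String) (ls : List String) :
    gA cur (s :: ls) =
      if altIsSep s = true ∧ cur ≠ [] then
        if cur.length ≥ 2 then
          (if PySem.List.slice cur none (some (-1)) ≠ [] then
              PySem.List.slice cur none (some (-1)) :: (gA [PySem.List.pyGetD cur (-1) "", s] ls).1
            else (gA [PySem.List.pyGetD cur (-1) "", s] ls).1,
            (gA [PySem.List.pyGetD cur (-1) "", s] ls).2)
        else gA (cur ++ [s]) ls
      else gA (cur ++ [s]) ls := rfl

lemma gA_snd_ne (block : List String) : ∀ (cur : List String),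
    cur ≠ [] ∨ block ≠ [] → (gA cur block).2 ≠ [] := by
  induction block with
  | nil => intro cur h; simpa [gA_nil] using h
  | cons s ls ih =>
    intro cur _
    rw [gA_cons]
    split
    · split
      · exact ih _ (Or.inl (by simp))
      · exact ih _ (Or.inl (by simp))
    · exact ih _ (Or.inl (by simp))

lemma foldT_block (block : List String)
    (hb : ∀ x ∈ block, PySem.Str.startswith x "|" = true) :
    ∀ (t : List (List String)) (cur : List String),
    block.foldl stepT (t, cur) = (t ++ (gA cur block).1, (gA cur block).2) := by
  induction block with
  | nil => intro t cur; simp [gA_nil]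
  | cons s ls ih =>
    intro t cur
    have hs : PySem.Str.startswith s "|" = true := hb s (List.mem_cons_self ..)
    have hls : ∀ x ∈ ls, PySem.Str.startswith x "|" = true :=
      fun x hx => hb x (List.mem_cons_of_mem _ hx)
    have hstepT : stepT (t, cur) s =
        (if altIsSep s = true ∧ cur ≠ [] then
          if cur.length ≥ 2 then
            (if PySem.List.slice cur none (some (-1)) ≠ [] then
                t ++ [PySem.List.slice cur none (some (-1))] else t,
              [PySem.List.pyGetD cur (-1) "", s])
          else (t, cur ++ [s])
        else (t, cur ++ [s])) := by
      unfold stepT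
      rw [if_neg (not_not_intro hs)]
    rw [List.foldl_cons, hstepT, gA_cons]
    by_cases hc : altIsSep s = true ∧ cur ≠ []
    · rw [if_pos hc, if_pos hc]
      by_cases h2 : cur.length ≥ 2
      · rw [if_pos h2, if_pos h2, ih hls]
        by_cases hp : PySem.List.slice cur none (some (-1)) ≠ []
        · rw [if_pos hp, if_pos hp]
          simp only [List.append_assoc, List.singleton_append]
        · rw [if_neg hp, if_neg hp]
      · rw [if_neg h2, if_neg h2, ih hls]
    · rw [if_neg hc, if_neg hc, ih hls]

-- the index-slicing loop of B replays gA: main block-level invariant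
set_option maxHeartbeats 1000000 in
lemma segIdx (block : List String) : ∀ (rest i start : Nat) (out : List (List String)),
    i + rest = block.length → (start < i ∨ (start = 0 ∧ i = 0)) →
    ((List.range' i rest).foldl (segStep block) (out, start)).1
      ++ [block.drop ((List.range' i rest).foldl (segStep block) (out, start)).2]
    = out ++ (gA ((block.drop start).take (i - start)) (block.drop i)).1
         ++ [(gA ((block.drop start).take (i - start)) (block.drop i)).2] := by
  intro rest
  induction rest with
  | zero =>
    intro i start out hi hsi
    have h1 : block.drop i = [] := List.drop_eq_nil_of_le (by omega)
    have h2 : (block.drop start).take (i - start) = block.drop start := by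
      apply List.take_of_length_le
      rw [List.length_drop]; omega
    rw [h1, h2, gA_nil]
    simp
  | succ rest ih =>
    intro i start out hi hsi
    have hin : i < block.length := by omega
    have hstart : start ≤ i := by omega
    have hgd : block.getD i "" = block[i] := by
      rw [List.getD_eq_getElem?_getD, List.getElem?_eq_getElem hin]; rfl
    have hdropi : block.drop i = block[i] :: block.drop (i + 1) :=
      List.drop_eq_getElem_cons hin
    have hlencur : ((block.drop start).take (i - start)).length = i - start := by
      rw [List.length_take, List.length_drop]; omega
    have hcurcons : (block.drop start).take (i - start) ++ [block[i]]
        = (block.drop start).take (i + 1 - start) := by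
      have h1 : i + 1 - start = (i - start) + 1 := by omega
      rw [h1, List.take_add_one]
      have h2 : (block.drop start)[i - start]? = some block[i] := by
        rw [List.getElem?_drop]
        rw [show start + (i - start) = i by omega, List.getElem?_eq_getElem hin]
      rw [h2]
      rfl
    rw [List.range'_succ, List.foldl_cons]
    by_cases hcond : altIsSep block[i] = true ∧ 2 ≤ i - start
    · -- boundary: emit block[start:idx-1], start := idx-1
      obtain ⟨hsep, h2⟩ := hcond
      have hcurne : (block.drop start).take (i - start) ≠ [] := by
        intro h; rw [h] at hlencur; simp at hlencur; omega
      have hstep : segStep block (out, start) i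
          = (out ++ [(block.drop start).take (i - 1 - start)], i - 1) := by
        simp only [segStep]
        rw [hgd, if_pos ⟨hsep, h2⟩]
      rw [hstep, ih (i + 1) (i - 1) _ (by omega) (by omega), hdropi, gA_cons,
        if_pos ⟨hsep, hcurne⟩, if_pos (by omega : ((block.drop start).take (i - start)).length ≥ 2)]
      have hprev : PySem.List.slice ((block.drop start).take (i - start)) none (some (-1))
          = (block.drop start).take (i - 1 - start) := by
        rw [PySem.List.slice_to_neg_one, List.dropLast_eq_take, hlencur, List.take_take,
          Nat.min_eq_left (by omega), show i - start - 1 = i - 1 - start from by omega]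
      have hlast : PySem.List.pyGetD ((block.drop start).take (i - start)) (-1) ""
          = block[i - 1]'(by omega) := by
        rw [PySem.List.pyGetD_neg_one _ _ hcurne, List.getLast_eq_getElem, List.getElem_take,
          List.getElem_drop]
        exact getElem_congr_idx (by omega)
      have hnewcur : (block.drop (i - 1)).take (i + 1 - (i - 1))
          = [block[i - 1]'(by omega), block[i]] := by
        rw [show i + 1 - (i - 1) = 2 by omega,
          List.drop_eq_getElem_cons (show i - 1 < block.length by omega),
          show i - 1 + 1 = i by omega, hdropi]
        rfl
      rw [hprev, hlast, hnewcur]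
      have hprevne : (block.drop start).take (i - 1 - start) ≠ [] := by
        intro h
        have := congrArg List.length h
        rw [List.length_take, List.length_drop] at this
        simp at this; omega
      rw [if_pos hprevne]
      simp only [List.append_assoc, List.cons_append, List.nil_append]
    · -- no boundary at idx: state unchanged, A appends the line to current
      have hstep : segStep block (out, start) i = (out, start) := by
        simp only [segStep]
        rw [hgd, if_neg hcond]
      rw [hstep, ih (i + 1) start _ (by omega) (by omega), hdropi, gA_cons]
      by_cases hc : altIsSep block[i] = true ∧ (block.drop start).take (i - start) ≠ []
      · have hlen2 : ¬ (((block.drop start).take (i - start)).length ≥ 2) := by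
          rw [hlencur]
          intro hge
          exact hcond ⟨hc.1, hge⟩
        rw [if_pos hc, if_neg hlen2, hcurcons]
      · rw [if_neg hc, hcurcons]

lemma altSeg_eq_gA (block : List String) :
    altSeg block = (gA [] block).1 ++ [(gA [] block).2] := by
  have h := segIdx block block.length 0 0 [] (by omega)
    (by rcases Nat.eq_zero_or_pos block.length with h | h <;> omega)
  rw [altSeg, List.range_eq_range']
  simpa using h

set_option maxHeartbeats 1000000 in
lemma main_lem : ∀ (n : Nat) (L : List String), L.length ≤ n →
    ∀ (t : List (List String)), finT (L.foldl stepT (t, [])) = t ++ altGo L := by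
  intro n
  induction n with
  | zero =>
    intro L hL t
    cases L with
    | nil => simp [finT, altGo]
    | cons l ls => simp at hL
  | succ n ih =>
    intro L hL t
    cases L with
    | nil => simp [finT, altGo]
    | cons l ls =>
      have hlsn : ls.length ≤ n := by simp at hL; omega
      by_cases hP : PySem.Str.startswith l "|" = true
      · -- one maximal '|'-block at the front
        have hgo : altGo (l :: ls) =
            altSeg (l :: ls.takeWhile (fun x => PySem.Str.startswith x "|"))
              ++ altGo (ls.dropWhile (fun x => PySem.Str.startswith x "|")) := by
          rw [altGo, if_pos hP]
        have hbAll : ∀ x ∈ l :: ls.takeWhile (fun x => PySem.Str.startswith x "|"),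
            PySem.Str.startswith x "|" = true := by
          intro x hx
          rcases List.mem_cons.mp hx with h | h
          · rw [h]; exact hP
          · exact List.mem_takeWhile_imp (p := fun x => PySem.Str.startswith x "|") h
        have hsplitL : l :: ls
            = (l :: ls.takeWhile (fun x => PySem.Str.startswith x "|"))
              ++ ls.dropWhile (fun x => PySem.Str.startswith x "|") := by
          rw [List.cons_append, List.takeWhile_append_dropWhile]
        have hCne : (gA [] (l :: ls.takeWhile (fun x => PySem.Str.startswith x "|"))).2 ≠ [] :=
          gA_snd_ne _ [] (Or.inr (List.cons_ne_nil _ _))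
        rw [hgo, altSeg_eq_gA, hsplitL, List.foldl_append,
          foldT_block _ hbAll t []]
        have hdroplen : (ls.dropWhile (fun x => PySem.Str.startswith x "|")).length ≤ ls.length :=
          List.length_dropWhile_le _ ls
        cases hres : ls.dropWhile (fun x => PySem.Str.startswith x "|") with
        | nil =>
          have hgonil : altGo [] = [] := by rw [altGo]
          rw [List.foldl_nil, finT, if_pos hCne, hgonil]
          simp only [List.append_nil, List.append_assoc]
        | cons r rs =>
          have hPr : PySem.Str.startswith r "|" = false := by
            have := List.head?_dropWhile_not (fun x => PySem.Str.startswith x "|") ls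
            rw [hres] at this
            simpa using this
          have hPr' : ¬ (PySem.Str.startswith r "|" = true) := by
            rw [hPr]; exact fun h => absurd h (by decide)
          have hstepr : stepT
              ((t ++ (gA [] (l :: ls.takeWhile (fun x => PySem.Str.startswith x "|"))).1),
               (gA [] (l :: ls.takeWhile (fun x => PySem.Str.startswith x "|"))).2) r
              = (t ++ (gA [] (l :: ls.takeWhile (fun x => PySem.Str.startswith x "|"))).1
                  ++ [(gA [] (l :: ls.takeWhile (fun x => PySem.Str.startswith x "|"))).2], []) := by
            unfold stepT
            rw [if_pos hPr', if_pos hCne]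
          have hrslen : rs.length ≤ n := by
            rw [hres] at hdroplen
            simp at hdroplen
            omega
          have hgor : altGo (r :: rs) = altGo rs := by
            rw [altGo, if_neg hPr']
          rw [List.foldl_cons, hstepr, ih rs hrslen, hgor]
          simp only [List.append_assoc]
      · -- non-table line with empty current: state unchanged
        have hstep : stepT (t, []) l = (t, []) := by
          unfold stepT
          rw [if_pos hP, if_neg (by exact fun h => h rfl)]
        have hgo : altGo (l :: ls) = altGo ls := by
          rw [altGo, if_neg hP]
        rw [List.foldl_cons, hstep, hgo]
        exact ih ls hlsn t

-- ===== VERDICT (by name: the statement is the Claim_ definition above) =====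
theorem splitSubtables_spec : Claim_equal_splitSubtables := by
  intro md _
  unfold Spec_splitSubtables splitSubtables splitSubtables_alt
  rw [← stepA_eq_stepT, ← List.foldl_map]
  exact main_lem _ _ (le_refl _) []
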